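-- pv_equiv track=rewrite | github.com/htetaunglhai/Nand2Tetris | 06/Assembler/test.py | getCInst
-- ===== SOURCE A (Python) =====
-- def getCInst(code):
--     dest = ''
--     jump = ''
--     comp = ''
--     gotComp = False
--     for char in range(len(code)):
--
--         if code[char] == '=':
--             dest = code[:char]
--             comp = code[char+1:]
--
--         if code[char] == ';':
--             jump = code[char+1:]
--             comp = code[:char]
--
--
--     return [dest, comp, jump]
-- ===== SOURCE B (Python) =====
-- def getCInst(code):
--     eq = code.rfind('=')
--     sc = code.rfind(';')
--     dest = code[:eq] if eq != -1 else ''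
--     jump = code[sc+1:] if sc != -1 else ''
--     if eq > sc:
--         comp = code[eq+1:]
--     elif sc != -1:
--         comp = code[:sc]
--     else:
--         comp = ''
--     return [dest, comp, jump]
-- ===== Notes on version B (the rewrite author's own statement) =====
-- stated objective: faster
-- what changed: Replaced the per-character loop that re-slices the string at every delimiter it meets with two rfind calls locating the last '=' and last ';' and three direct slices, reproducing the original's last-delimiter-wins behaviour (including comp = everything before the last ';' even when an '=' precedes it).
import Mathlib
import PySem

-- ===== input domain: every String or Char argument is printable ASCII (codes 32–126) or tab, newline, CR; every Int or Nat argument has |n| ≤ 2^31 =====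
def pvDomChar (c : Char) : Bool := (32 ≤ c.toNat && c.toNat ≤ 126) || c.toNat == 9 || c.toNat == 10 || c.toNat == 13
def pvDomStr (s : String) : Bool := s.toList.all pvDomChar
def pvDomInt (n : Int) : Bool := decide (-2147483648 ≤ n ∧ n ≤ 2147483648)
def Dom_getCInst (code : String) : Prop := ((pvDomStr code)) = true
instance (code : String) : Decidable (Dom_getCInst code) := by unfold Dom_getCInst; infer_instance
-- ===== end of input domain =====

-- B replaces A's per-character loop (which re-slices at every '='/';') with two rfind
-- calls for the last '=' and last ';' and three direct slices — same return value.

-- ===== PORT A =====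
-- state is (dest, jump, comp); A's variable gotComp is initialised to False and never
-- read or written again, so it is omitted from the state.
def getCInst (code : String) : List String :=
  let r : String × String × String :=
    (PySem.List.pyRange 0 (PySem.Str.len code)).foldl
      (fun st char =>
        let st :=
          if PySem.Str.pyGet? code char = some '=' then
            (PySem.Str.slice code none (some char), st.2.1,
             PySem.Str.slice code (some (char + 1)) none)
          else st
        if PySem.Str.pyGet? code char = some ';' then
          (st.1, PySem.Str.slice code (some (char + 1)) none,
           PySem.Str.slice code none (some char))
        else st)
      ("", "", "")
  [r.1, r.2.2, r.2.1]

-- ===== PORT B =====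
def getCInst_alt (code : String) : List String :=
  let eq := PySem.Str.rfind code "="
  let sc := PySem.Str.rfind code ";"
  let dest := if eq ≠ -1 then PySem.Str.slice code none (some eq) else ""
  let jump := if sc ≠ -1 then PySem.Str.slice code (some (sc + 1)) none else ""
  let comp :=
    if eq > sc then PySem.Str.slice code (some (eq + 1)) none
    else if sc ≠ -1 then PySem.Str.slice code none (some sc)
    else ""
  [dest, comp, jump]

-- ===== PRECONDITION & SPEC =====
def Spec_getCInst (code : String) (out : List String) : Prop := out = getCInst_alt code
instance (code : String) (out : List String) : Decidable (Spec_getCInst code out) := by unfold Spec_getCInst; infer_instance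

-- ===== CLAIM (what is proved, stated in full; the proofs are below) =====
def Claim_equal_getCInst : Prop := ∀ (code : String), Dom_getCInst code → Spec_getCInst code (getCInst code)

-- ===== LEMMAS AND PROOFS =====

-- greatest index i < n with l[i] = c
def lastIdx (l : List Char) (c : Char) : Nat → Option Nat
  | 0 => none
  | n + 1 => if l[n]? = some c then some n else lastIdx l c n

theorem lastIdx_lt (l : List Char) (c : Char) (n i : Nat)
    (h : lastIdx l c n = some i) : i < n := by
  induction n with
  | zero => simp [lastIdx] at h
  | succ m ih =>
    unfold lastIdx at h
    split at h
    · cases h; omega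
    · exact Nat.lt_succ_of_lt (ih h)

theorem lastIdx_stable (l : List Char) (c : Char) (n : Nat) (h : l.length ≤ n) :
    lastIdx l c (n + 1) = lastIdx l c n := by
  rw [show lastIdx l c (n + 1) = (if l[n]? = some c then some n else lastIdx l c n) from rfl,
      List.getElem?_eq_none (by omega)]
  simp

theorem singleton_isPrefixOf (c : Char) (m : List Char) :
    [c].isPrefixOf m = true ↔ m[0]? = some c := by
  cases m with
  | nil => simp [List.isPrefixOf]
  | cons d t => simp only [List.isPrefixOf, Bool.and_eq_true, beq_iff_eq,
      and_true, List.getElem?_cons_zero, Option.some.injEq]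
                exact eq_comm

theorem rfind_go_eq (l : List Char) (c : Char) (n : Nat) :
    PySem.Chars.rfind.go l [c] n =
      (match lastIdx l c (n + 1) with | some i => (i : Int) | none => -1) := by
  induction n with
  | zero =>
    simp only [PySem.Chars.rfind.go, singleton_isPrefixOf]
    rcases h : l[0]? with _ | d
    · simp [lastIdx, h]
    · by_cases hc : d = c <;> simp [lastIdx, h, hc]
  | succ m ih =>
    have hgo : PySem.Chars.rfind.go l [c] (m + 1) =
        (if [c].isPrefixOf (List.drop (m + 1) l) = true then ((m + 1 : Nat) : Int)
         else PySem.Chars.rfind.go l [c] m) := rfl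
    have hli : lastIdx l c (m + 1 + 1) =
        (if l[m + 1]? = some c then some (m + 1) else lastIdx l c (m + 1)) := rfl
    have hcond : ([c].isPrefixOf (List.drop (m + 1) l) = true) ↔ l[m + 1]? = some c := by
      rw [singleton_isPrefixOf, List.getElem?_drop]
    rw [hgo, hli]
    by_cases h : l[m + 1]? = some c
    · rw [if_pos (hcond.mpr h), if_pos h]
    · rw [if_neg (fun hh => h (hcond.mp hh)), if_neg h, ih]

theorem rfind_eq_lastIdx (l : List Char) (c : Char) :
    PySem.Chars.rfind l [c] =
      (match lastIdx l c l.length with | some i => (i : Int) | none => -1) := by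
  rw [show PySem.Chars.rfind l [c] = PySem.Chars.rfind.go l [c] l.length from rfl,
      rfind_go_eq, lastIdx_stable l c l.length le_rfl]

-- the state of A's loop after processing indices 0 .. n-1
def stateSpec (code : String) (n : Nat) : String × String × String :=
  let l := code.toList
  let dest := match lastIdx l '=' n with
    | some i => PySem.Str.slice code none (some (i : Int))
    | none => ""
  let jump := match lastIdx l ';' n with
    | some j => PySem.Str.slice code (some ((j : Int) + 1)) none
    | none => ""
  let comp := match lastIdx l '=' n, lastIdx l ';' n with
    | none, none => ""
    | some i, none => PySem.Str.slice code (some ((i : Int) + 1)) none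
    | none, some j => PySem.Str.slice code none (some (j : Int))
    | some i, some j =>
        if j < i then PySem.Str.slice code (some ((i : Int) + 1)) none
        else PySem.Str.slice code none (some (j : Int))
  (dest, jump, comp)

theorem foldA_eq_stateSpec (code : String) (n : Nat) (hn : n ≤ code.toList.length) :
    (PySem.List.pyRange 0 (n : Int)).foldl
      (fun (st : String × String × String) char =>
        let st :=
          if PySem.Str.pyGet? code char = some '=' then
            (PySem.Str.slice code none (some char), st.2.1,
             PySem.Str.slice code (some (char + 1)) none)
          else st
        if PySem.Str.pyGet? code char = some ';' then
          (st.1, PySem.Str.slice code (some (char + 1)) none,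
           PySem.Str.slice code none (some char))
        else st)
      ("", "", "") = stateSpec code n := by
  induction n with
  | zero =>
    simp [PySem.List.pyRange, stateSpec, lastIdx]
  | succ m ih =>
    have hm : m ≤ code.toList.length := by omega
    have h1 : PySem.List.pyRange 0 ((m : Int) + 1) =
        PySem.List.pyRange 0 (m : Int) ++ PySem.List.pyRange (m : Int) ((m : Int) + 1) :=
      PySem.List.pyRange_one_append 0 (m : Int) ((m : Int) + 1) (by positivity) (by omega)
    have h2 : PySem.List.pyRange (m : Int) ((m : Int) + 1) = [(m : Int)] := by
      rw [PySem.List.pyRange_one_cons (by omega)]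
      simp [PySem.List.pyRange]
    rw [show ((m + 1 : Nat) : Int) = (m : Int) + 1 from by push_cast; ring, h1, h2,
        List.foldl_append, ih hm]
    simp only [List.foldl_cons, List.foldl_nil, PySem.Str.pyGet?_natCast]
    have hL : lastIdx code.toList '=' (m + 1) =
        (if code.toList[m]? = some '=' then some m else lastIdx code.toList '=' m) := rfl
    have hS : lastIdx code.toList ';' (m + 1) =
        (if code.toList[m]? = some ';' then some m else lastIdx code.toList ';' m) := rfl
    rcases hc : code.toList[m]? with _ | d
    · exact absurd (List.getElem?_eq_none_iff.mp hc) (by omega)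
    by_cases he : d = '='
    · subst he
      simp only [stateSpec, hL, hS, hc]
      norm_num
      rcases hj : lastIdx code.toList ';' m with _ | j
      · simp
      · have := lastIdx_lt code.toList ';' m j hj
        simp [this]
    by_cases hs : d = ';'
    · subst hs
      simp only [stateSpec, hL, hS, hc]
      norm_num [he]
      rcases hi : lastIdx code.toList '=' m with _ | i
      · simp
      · have := lastIdx_lt code.toList '=' m i hi
        simp [show ¬ m < i by omega]
    · simp only [stateSpec, hL, hS, hc]
      simp [he, hs]

-- ===== VERDICT (by name: the statement is the Claim_ definition above) =====
theorem getCInst_spec : Claim_equal_getCInst := by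
  intro code _
  unfold Spec_getCInst getCInst getCInst_alt
  rw [show PySem.Str.len code = ((code.toList.length : Nat) : Int) from rfl,
      foldA_eq_stateSpec code code.toList.length le_rfl,
      PySem.Str.rfind_eq, PySem.Str.rfind_eq,
      show ("=" : String).toList = ['='] from rfl,
      show (";" : String).toList = [';'] from rfl,
      rfind_eq_lastIdx, rfind_eq_lastIdx]
  unfold stateSpec
  rcases h1 : lastIdx code.toList '=' code.toList.length with _ | i <;>
    rcases h2 : lastIdx code.toList ';' code.toList.length with _ | j <;>
    simp only [h1, h2] at *
  · norm_num
  · have : ¬ ((-1 : Int) > (j : Int)) := by omega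
    simp [this, show ((j : Int) ≠ -1) by omega]
  · have : ((i : Int) > -1) := by omega
    simp [this, show ((i : Int) ≠ -1) by omega]
  · by_cases hij : j < i
    · have : ((i : Int) > (j : Int)) := by omega
      simp [hij, this, show ((i : Int) ≠ -1) by omega, show ((j : Int) ≠ -1) by omega]
    · have : ¬ ((i : Int) > (j : Int)) := by omega
      simp [hij, this, show ((i : Int) ≠ -1) by omega, show ((j : Int) ≠ -1) by omega]
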